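-- pv_equiv track=rewrite | github.com/s214684/mariokart-tournament | services.py | take_distinct
-- ===== SOURCE A (Python) =====
-- from typing import List, Tuple, Dict, Optional, Set
--
-- def take_distinct(pool: List[int], k: int) -> List[int]:
--     """Pop up to k distinct player IDs from pool (in-place)."""
--     group = []
--     i = 0
--     while i < len(pool) and len(group) < k:
--         pid = pool[i]
--         if pid not in group:
--             group.append(pid)
--             pool.pop(i)
--         else:
--             i += 1
--     return group
-- ===== SOURCE B (Python) =====
-- def take_distinct(pool, k):
--     """Pop up to k distinct player IDs from pool (in-place)."""
--     group = list(dict.fromkeys(pool))[:max(k, 0)]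
--     for pid in group:
--         pool.remove(pid)
--     return group
-- ===== Notes on version B (the rewrite author's own statement) =====
-- stated objective: simpler
-- what changed: A interleaves scanning and popping in one index-walk loop; B first builds the ordered distinct prefix in one phase via dict.fromkeys and slicing, then removes those ids from the pool in a separate pass.
import Mathlib
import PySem

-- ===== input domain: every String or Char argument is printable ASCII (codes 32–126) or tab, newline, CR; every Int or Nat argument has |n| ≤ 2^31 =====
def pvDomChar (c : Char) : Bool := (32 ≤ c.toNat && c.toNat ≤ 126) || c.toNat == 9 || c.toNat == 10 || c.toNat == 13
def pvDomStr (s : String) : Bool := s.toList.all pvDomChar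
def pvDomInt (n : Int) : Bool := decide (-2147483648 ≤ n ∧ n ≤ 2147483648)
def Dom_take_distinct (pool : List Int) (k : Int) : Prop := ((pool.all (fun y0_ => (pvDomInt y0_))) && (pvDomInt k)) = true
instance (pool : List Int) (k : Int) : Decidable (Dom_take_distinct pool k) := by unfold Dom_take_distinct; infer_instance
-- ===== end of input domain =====

-- B replaces A's single interleaved scan-and-pop index walk by two phases: build the
-- ordered distinct prefix, then remove those ids from the pool (objective: simpler).
-- Both Pythons mutate `pool` in place identically; the equivalence proved here is
-- about the RETURN value only.

-- ===== PORT A =====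
-- A's while-loop over state (pool, group, i); pool.pop(i) at a valid index is eraseIdx.
def tdLoop (pool group : List Int) (i : Nat) (k : Int) : List Int :=
  if h : i < pool.length ∧ (group.length : Int) < k then
    let pid := pool[i]'h.1
    if pid ∈ group then
      tdLoop pool group (i + 1) k
    else
      tdLoop (pool.eraseIdx i) (group ++ [pid]) i k
  else group
termination_by pool.length - i
decreasing_by
  · omega
  · have h1 := h.1
    have : (pool.eraseIdx i).length = pool.length - 1 := by
      rw [List.length_eraseIdx]; simp [h1]
    omega

def take_distinct (pool : List Int) (k : Int) : List Int :=
  tdLoop pool [] 0 k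

-- ===== PORT B =====
-- group = list(dict.fromkeys(pool))[:max(k, 0)]; the subsequent pool.remove pass only
-- mutates pool and does not affect the returned value.
def take_distinct_alt (pool : List Int) (k : Int) : List Int :=
  PySem.List.slice (PySem.List.dedup pool) none (some (max k 0))

-- ===== PRECONDITION & SPEC =====
def Spec_take_distinct (pool : List Int) (k : Int) (out : List Int) : Prop := out = take_distinct_alt pool k
instance (pool : List Int) (k : Int) (out : List Int) : Decidable (Spec_take_distinct pool k out) := by unfold Spec_take_distinct; infer_instance

-- ===== CLAIM (what is proved, stated in full; the proofs are below) =====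
def Claim_equal_take_distinct : Prop := ∀ (pool : List Int) (k : Int), Dom_take_distinct pool k → Spec_take_distinct pool k (take_distinct pool k)

-- ===== LEMMAS AND PROOFS =====

-- A's loop with the already-scanned prefix abstracted away: only the not-yet-scanned
-- suffix of the pool matters once every scanned element is known to be in `group`.
def tdRest (rest group : List Int) (k : Int) : List Int :=
  match rest with
  | [] => group
  | x :: xs =>
    if (group.length : Int) < k then
      if x ∈ group then tdRest xs group k else tdRest xs (group ++ [x]) k
    else group

-- the elements of xs not in `seen`, first occurrences, in order
def dedupFrom (seen xs : List Int) : List Int :=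
  match xs with
  | [] => []
  | x :: xs => if x ∈ seen then dedupFrom seen xs else x :: dedupFrom (seen ++ [x]) xs

theorem tdLoop_eq_tdRest (k : Int) :
    ∀ (pool group : List Int) (i : Nat),
      (∀ x ∈ pool.take i, x ∈ group) →
      tdLoop pool group i k = tdRest (pool.drop i) group k := by
  intro pool group i
  induction pool, group, i using tdLoop.induct (k := k) with
  | case1 pool group i h pid hmem ih =>
    intro hpre
    rw [tdLoop]
    have hmem' : pool[i]'h.1 ∈ group := hmem
    simp only [h, and_true, dif_pos]
    rw [if_pos hmem', List.drop_eq_getElem_cons h.1, tdRest, if_pos h.2, if_pos hmem']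
    apply ih
    intro x hx
    rw [List.take_add_one, List.getElem?_eq_getElem h.1] at hx
    simp only [List.mem_append] at hx
    rcases hx with hx | hx
    · exact hpre x hx
    · simp only [Option.toList] at hx
      simp only [List.mem_singleton] at hx
      exact hx ▸ hmem
  | case2 pool group i h pid hmem ih =>
    intro hpre
    rw [tdLoop]
    have hmem' : ¬ (pool[i]'h.1 ∈ group) := hmem
    simp only [h, and_true, dif_pos]
    rw [if_neg hmem', List.drop_eq_getElem_cons h.1, tdRest, if_pos h.2, if_neg hmem']
    rw [ih ?_]
    · congr 1
      rw [List.eraseIdx_eq_take_drop_succ, List.drop_append]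
      simp [List.length_take, Nat.min_eq_left (Nat.le_of_lt h.1)]
    · intro x hx
      rw [List.eraseIdx_eq_take_drop_succ,
        List.take_append_of_le_length (by simp [Nat.le_of_lt h.1]),
        List.take_take, Nat.min_self] at hx
      exact List.mem_append_left _ (hpre x hx)
  | case3 pool group i h =>
    intro hpre
    rw [tdLoop]
    simp only [dif_neg h]
    rcases Nat.lt_or_ge i pool.length with hi | hi
    · have hk : ¬ ((group.length : Int) < k) := fun hk => h ⟨hi, hk⟩
      rw [List.drop_eq_getElem_cons hi, tdRest, if_neg hk]
    · rw [List.drop_eq_nil_of_le hi, tdRest]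

theorem tdRest_eq_dedupFrom (xs : List Int) :
    ∀ (group : List Int) (k : Int),
      tdRest xs group k = group ++ (dedupFrom group xs).take (k - group.length).toNat := by
  induction xs with
  | nil => intro group k; simp [tdRest, dedupFrom]
  | cons x xs ih =>
    intro group k
    rw [tdRest, dedupFrom]
    by_cases hk : (group.length : Int) < k
    · rw [if_pos hk]
      by_cases hm : x ∈ group
      · rw [if_pos hm, if_pos hm, ih]
      · rw [if_neg hm, if_neg hm, ih]
        have h1 : (k - group.length).toNat = (k - (group ++ [x]).length).toNat + 1 := by
          simp only [List.length_append, List.length_singleton]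
          omega
        rw [h1, List.take_succ_cons, List.append_assoc, List.singleton_append]
    · rw [if_neg hk]
      have h0 : (k - group.length).toNat = 0 := by omega
      rw [h0, List.take_zero, List.append_nil]

theorem foldl_add_eq_dedupFrom (xs : List Int) :
    ∀ (seen : List Int), List.foldl PySem.Set.add seen xs = seen ++ dedupFrom seen xs := by
  induction xs with
  | nil => intro seen; simp [dedupFrom]
  | cons x xs ih =>
    intro seen
    rw [List.foldl_cons, dedupFrom, PySem.Set.add]
    by_cases hm : x ∈ seen
    · rw [if_pos (by simpa using hm), if_pos hm, ih]
    · rw [if_neg (by simpa using hm), if_neg hm, ih, List.append_assoc, List.singleton_append]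

theorem dedup_eq_dedupFrom (xs : List Int) : PySem.List.dedup xs = dedupFrom [] xs := by
  rw [PySem.List.dedup, PySem.Set.ofList]
  have := foldl_add_eq_dedupFrom xs []
  simpa [PySem.Set.empty] using this

-- ===== VERDICT (by name: the statement is the Claim_ definition above) =====
theorem take_distinct_spec : Claim_equal_take_distinct := by
  intro pool k _
  show take_distinct pool k = take_distinct_alt pool k
  rw [take_distinct, take_distinct_alt,
    tdLoop_eq_tdRest k pool [] 0 (by simp),
    List.drop_zero, tdRest_eq_dedupFrom, dedup_eq_dedupFrom,
    PySem.List.slice_to _ (le_max_right k 0)]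
  simp only [List.length_nil, Int.natCast_zero, Int.sub_zero, List.nil_append]
  congr 1
  omega
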